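-- pv_equiv track=rewrite | github.com/MarkSon-42/Team_ALGO | seunghyeon/24. 프로세스/프로세스_solved.py | solution
-- ===== SOURCE A (Python) =====
-- from collections import deque
--
-- def targetLocation(rst, location):
--     for i in rst:
--         if i[1] == location:
--             return i[2]
--
-- def solution(priorities, location):
--     q = deque()
--     for i, p in enumerate(priorities):
--         q.append((p, i, 0)) # p: 순위, i: 처음 인덱스
--
--     rst = []
--     rank = 0
--     while q:
--         maxVal = max(q[i][0] for i in range(len(q)))
--         a, b, c, = q.popleft()
--         if a < maxVal:
--             q.append((a, b, c))
--         else: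
--             rank += 1
--             rst.append((a, b, rank))
--
--     return targetLocation(rst, location)
-- ===== SOURCE B (Python) =====
-- def solution(priorities, location):
--     # One pass per printed document: rotate straight to the first maximal
--     # element with a slice instead of requeueing one item at a time, and
--     # return as soon as the target document is printed.
--     q = list(enumerate(priorities))
--     rank = 0
--     while q:
--         m = max(p for _, p in q)
--         j = next(k for k in range(len(q)) if q[k][1] == m)
--         i = q[j][0]
--         rank += 1
--         if i == location:
--             return rank
--         q = q[j + 1:] + q[:j]
--     return None
-- ===== Notes on version B (the rewrite author's own statement) =====
-- stated objective: faster
-- what changed: Instead of recomputing the max and requeueing one element per deque pop, B finds the first maximal element's index once per printed document, rotates the list to it with two slices, and returns as soon as the document at `location` is printed (no rst list, no final lookup).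
import Mathlib
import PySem

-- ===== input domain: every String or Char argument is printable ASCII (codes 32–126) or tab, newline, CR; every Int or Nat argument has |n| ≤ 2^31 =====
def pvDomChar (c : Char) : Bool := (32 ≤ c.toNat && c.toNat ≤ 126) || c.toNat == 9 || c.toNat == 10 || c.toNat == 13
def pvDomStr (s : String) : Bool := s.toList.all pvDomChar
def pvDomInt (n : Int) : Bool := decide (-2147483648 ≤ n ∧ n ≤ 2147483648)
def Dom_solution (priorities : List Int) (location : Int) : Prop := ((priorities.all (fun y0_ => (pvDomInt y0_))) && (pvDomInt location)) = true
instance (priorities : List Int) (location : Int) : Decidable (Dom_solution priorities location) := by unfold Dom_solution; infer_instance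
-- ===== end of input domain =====

-- B jumps straight to the first maximal element once per printed document (two slices) and
-- returns as soon as the target is printed, instead of A's one-element-at-a-time requeueing
-- with the max recomputed at every pop and a final lookup in a result list (objective: faster).

-- ===== PORT A =====
-- `lmax l` = max of a nonempty list; used only in the ports' termination measures
-- (cited by `decreasing_by`), it is not part of either algorithm's computation.
def lmax (l : List Int) : Int :=
  match l with
  | [] => 0
  | a :: r => r.foldl max a

lemma lmax_mem (l : List Int) (h : l ≠ []) : lmax l ∈ l := by
  match l with
  | a :: r =>
    simp only [lmax]
    rcases PySem.List.foldl_max_mem r a with h1 | h1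
    · rw [h1]; exact List.mem_cons_self
    · exact List.mem_cons_of_mem _ h1

lemma le_lmax (l : List Int) : ∀ y ∈ l, y ≤ lmax l := by
  intro y hy
  match l with
  | a :: r =>
    simp only [lmax]
    rcases List.mem_cons.mp hy with rfl | hy
    · exact (PySem.List.le_foldl_max r y).1
    · exact (PySem.List.le_foldl_max r a).2 y hy

lemma lmax_perm (l l' : List Int) (hp : l.Perm l') (h : l ≠ []) : lmax l = lmax l' := by
  have h' : l' ≠ [] := by intro h0; subst h0; exact h hp.eq_nil
  exact le_antisymm
    (le_lmax l' _ (hp.mem_iff.mp (lmax_mem l h)))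
    (le_lmax l _ (hp.mem_iff.mpr (lmax_mem l' h')))

-- the `max(q[i][0] for i in range(len(q)))` expression of A, as a value of `lmax`
lemma qmax_eq (x : Int × Int × Int) (rest : List (Int × Int × Int)) :
    ((PySem.List.max? ((PySem.List.pyRange 0 ((x :: rest).length : Int)).map
        (fun i => (PySem.List.pyGetD (x :: rest) i ((0:Int),(0:Int),(0:Int))).1)) (fun v => v)).getD 0)
      = lmax ((x :: rest).map (fun t => t.1)) := by
  have h1 : (PySem.List.pyRange 0 ((x :: rest).length : Int)).map
      (fun i => (PySem.List.pyGetD (x :: rest) i ((0:Int),(0:Int),(0:Int))).1)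
      = (x :: rest).map (fun t => t.1) := by
    have h2 := PySem.List.map_pyGetD_pyRange_zero' (x :: rest) ((0:Int),(0:Int),(0:Int))
    conv_rhs => rw [← h2]
    rw [List.map_map]
    rfl
  rw [h1]
  simp only [List.map_cons, PySem.List.max?_id_cons, Option.getD_some, lmax]

-- measure decrease for A's requeue branch (cited by aloop's decreasing_by)
lemma aloop_dec (x : Int × Int × Int) (rest : List (Int × Int × Int))
    (h : x.1 < lmax ((x :: rest).map (fun t => t.1))) :
    List.findIdx (fun t => t.1 == lmax ((rest ++ [x]).map (fun t => t.1))) (rest ++ [x])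
      < List.findIdx (fun t => t.1 == lmax ((x :: rest).map (fun t => t.1))) (x :: rest) := by
  have hperm : ((rest ++ [x]).map (fun t : Int × Int × Int => t.1)).Perm
      ((x :: rest).map (fun t => t.1)) :=
    (List.perm_append_singleton x rest).map _
  have hne : (x :: rest).map (fun t : Int × Int × Int => t.1) ≠ [] := by simp
  have hM : lmax ((rest ++ [x]).map (fun t => t.1)) = lmax ((x :: rest).map (fun t => t.1)) :=
    lmax_perm _ _ hperm (by simp)
  set M := lmax ((x :: rest).map (fun t : Int × Int × Int => t.1)) with hMdef
  rw [hM]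
  have hxne : (x.1 == M) = false := by simp; omega
  have hMmem : M ∈ (x :: rest).map (fun t : Int × Int × Int => t.1) := lmax_mem _ hne
  have hMrest : ∃ t ∈ rest, ((fun t : Int × Int × Int => t.1 == M) t) = true := by
    rcases List.mem_map.mp hMmem with ⟨t, ht, hte⟩
    rcases List.mem_cons.mp ht with rfl | ht'
    · exfalso; omega
    · exact ⟨t, ht', by simp [hte]⟩
  have hlt : List.findIdx (fun t : Int × Int × Int => t.1 == M) rest < rest.length :=
    List.findIdx_lt_length_of_exists hMrest
  rw [List.findIdx_append, if_pos hlt, List.findIdx_cons, hxne]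
  simp only [cond_false]
  omega

def targetLocation (rst : List (Int × Int × Int)) (location : Int) : Option Int :=
  match rst with
  | [] => none
  | i :: rest => if i.2.1 = location then some i.2.2 else targetLocation rest location

def aloop (q : List (Int × Int × Int)) (rst : List (Int × Int × Int)) (rank : Int) :
    List (Int × Int × Int) :=
  match q with
  | [] => rst
  | x :: rest =>
    -- maxVal = max(q[i][0] for i in range(len(q)))
    let maxVal := (PySem.List.max? ((PySem.List.pyRange 0 ((x :: rest).length : Int)).map
        (fun i => (PySem.List.pyGetD (x :: rest) i ((0:Int),(0:Int),(0:Int))).1)) (fun v => v)).getD 0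
    if x.1 < maxVal then aloop (rest ++ [x]) rst rank
    else aloop rest (rst ++ [(x.1, x.2.1, rank + 1)]) (rank + 1)
termination_by (q.length, List.findIdx (fun t => t.1 == lmax (q.map (fun t => t.1))) q)
decreasing_by
  · have hlen : (rest ++ [x]).length = (x :: rest).length := by simp
    rw [hlen]
    apply Prod.Lex.right
    apply aloop_dec
    rename_i h
    simp only [maxVal] at h
    rwa [qmax_eq] at h
  · apply Prod.Lex.left; simp

def solution (priorities : List Int) (location : Int) : Option Int :=
  let q := (PySem.List.enumerate priorities).foldl (fun acc ip => acc ++ [(ip.2, ip.1, (0:Int))]) []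
  targetLocation (aloop q [] 0) location

-- ===== PORT B =====
-- first index of a maximal priority exists (cited by bloop's decreasing_by)
lemma bfind_lt (x : Int × Int) (rest : List (Int × Int)) :
    List.findIdx (fun t => t.2 == (PySem.List.max? ((x :: rest).map (fun t => t.2))
        (fun v => v)).getD 0) (x :: rest) < (x :: rest).length := by
  simp only [List.map_cons, PySem.List.max?_id_cons, Option.getD_some]
  apply List.findIdx_lt_length_of_exists
  have hmem : lmax ((x :: rest).map (fun t : Int × Int => t.2)) ∈
      (x :: rest).map (fun t : Int × Int => t.2) := lmax_mem _ (by simp)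
  rcases List.mem_map.mp hmem with ⟨t, ht, hte⟩
  exact ⟨t, ht, by simp [hte, lmax]⟩

def bloop (q : List (Int × Int)) (rank : Int) (location : Int) : Option Int :=
  match q with
  | [] => none
  | x :: rest =>
    -- m = max(p for _, p in q)
    let m := (PySem.List.max? ((x :: rest).map (fun t => t.2)) (fun v => v)).getD 0
    -- j = next(k for k in range(len(q)) if q[k][1] == m); List.findIdx is exact here since a
    -- maximal element always exists (bfind_lt), so the generator never exhausts
    let j := List.findIdx (fun t => t.2 == m) (x :: rest)
    -- i = q[j][0]
    let i := (PySem.List.pyGetD (x :: rest) (j : Int) ((0:Int),(0:Int))).1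
    if i = location then some (rank + 1)
    else bloop (PySem.List.slice (x :: rest) (some ((j : Int) + 1)) none ++
                PySem.List.slice (x :: rest) none (some (j : Int))) (rank + 1) location
termination_by q.length
decreasing_by
  have hj := bfind_lt x rest
  have h1 : ((List.findIdx (fun t => t.2 == (PySem.List.max? ((x :: rest).map (fun t => t.2))
      (fun v => v)).getD 0) (x :: rest) : Int) + 1)
      = ((List.findIdx (fun t => t.2 == (PySem.List.max? ((x :: rest).map (fun t => t.2))
          (fun v => v)).getD 0) (x :: rest) + 1 : Nat) : Int) := by push_cast; ring
  rw [h1, PySem.List.slice_from_natCast, PySem.List.slice_to_natCast]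
  simp only [List.length_append, List.length_drop, List.length_take, List.length_cons] at *
  omega

def solution_alt (priorities : List Int) (location : Int) : Option Int :=
  bloop (PySem.List.enumerate priorities) 0 location

-- ===== PRECONDITION & SPEC =====
def Spec_solution (priorities : List Int) (location : Int) (out : Option Int) : Prop := out = solution_alt priorities location
instance (priorities : List Int) (location : Int) (out : Option Int) : Decidable (Spec_solution priorities location out) := by unfold Spec_solution; infer_instance

-- ===== CLAIM (what is proved, stated in full; the proofs are below) =====
def Claim_equal_solution : Prop := ∀ (priorities : List Int) (location : Int), Dom_solution priorities location → Spec_solution priorities location (solution priorities location)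

-- ===== LEMMAS AND PROOFS =====

lemma aloop_append (q rst : List (Int × Int × Int)) (rank : Int) :
    ∀ rst1, aloop q (rst1 ++ rst) rank = rst1 ++ aloop q rst rank := by
  induction q, rst, rank using aloop.induct with
  | case1 rst rank => intro rst1; simp [aloop]
  | case2 rst rank i rest maxVal h ih =>
    intro rst1
    rw [aloop, aloop]
    simp only [maxVal] at h
    rw [if_pos h, if_pos h]
    exact ih rst1
  | case3 rst rank i rest maxVal h ih =>
    intro rst1
    rw [aloop, aloop]
    simp only [maxVal] at h
    rw [if_neg h, if_neg h]
    rw [List.append_assoc]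
    exact ih rst1

lemma aloop_rot : ∀ (n : Nat) (q rst : List (Int × Int × Int)) (rank : Int),
    List.findIdx (fun t => t.1 == lmax (q.map (fun t => t.1))) q = n → n < q.length →
    aloop q rst rank = aloop (q.drop n ++ q.take n) rst rank := by
  intro n
  induction n with
  | zero => intro q rst rank _ _; simp
  | succ n ihn =>
    intro q rst rank hfind hlt
    match q with
    | x :: rest =>
      have hxne : x.1 ≠ lmax ((x :: rest).map (fun t => t.1)) := by
        intro hc
        rw [List.findIdx_cons,
          show (x.1 == lmax ((x :: rest).map (fun t => t.1))) = true from by rw [hc]; exact beq_self_eq_true _] at hfind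
        simp at hfind
      have hx0 : (x.1 == lmax ((x :: rest).map (fun t => t.1))) = false := by simpa using hxne
      have hxle : x.1 ≤ lmax ((x :: rest).map (fun t => t.1)) :=
        le_lmax _ _ (List.mem_map.mpr ⟨x, List.mem_cons_self, rfl⟩)
      have hxlt : x.1 < lmax ((x :: rest).map (fun t => t.1)) := lt_of_le_of_ne hxle hxne
      have hrest : List.findIdx (fun t => t.1 == lmax ((x :: rest).map (fun t => t.1))) rest = n := by
        rw [List.findIdx_cons, hx0] at hfind
        simpa using hfind
      have hnlt : n < rest.length := by
        simp only [List.length_cons] at hlt; omega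
      have hstep : aloop (x :: rest) rst rank = aloop (rest ++ [x]) rst rank := by
        rw [aloop, qmax_eq, if_pos hxlt]
      have hperm : ((rest ++ [x]).map (fun t : Int × Int × Int => t.1)).Perm
          ((x :: rest).map (fun t => t.1)) := (List.perm_append_singleton x rest).map _
      have hM' : lmax ((rest ++ [x]).map (fun t => t.1)) = lmax ((x :: rest).map (fun t => t.1)) :=
        lmax_perm _ _ hperm (by simp)
      have hfind' : List.findIdx (fun t => t.1 == lmax ((rest ++ [x]).map (fun t => t.1)))
          (rest ++ [x]) = n := by
        rw [hM', List.findIdx_append, if_pos (by rw [hrest]; exact hnlt), hrest]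
      have hlen' : n < (rest ++ [x]).length := by simp; omega
      rw [hstep, ihn (rest ++ [x]) rst rank hfind' hlen']
      congr 1
      have hnle : n ≤ rest.length := le_of_lt hnlt
      rw [List.drop_append_of_le_length hnle, List.take_append_of_le_length hnle,
        List.drop_succ_cons, List.take_succ_cons, List.append_assoc, List.singleton_append]

lemma targetLocation_nil (location : Int) : targetLocation [] location = none := rfl

lemma targetLocation_cons (i : Int × Int × Int) (rest : List (Int × Int × Int)) (location : Int) :
    targetLocation (i :: rest) location
      = if i.2.1 = location then some i.2.2 else targetLocation rest location := rfl

lemma bloop_nil (rank location : Int) : bloop [] rank location = none := by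
  rw [bloop.eq_def]

lemma main_lemma : ∀ (n : Nat) (q : List (Int × Int × Int)) (rank location : Int), q.length = n →
    targetLocation (aloop q [] rank) location
      = bloop (q.map (fun t => (t.2.1, t.1))) rank location := by
  intro n
  induction n using Nat.strong_induction_on with
  | _ n IH =>
    intro q rank location hlen
    match q with
    | [] => rw [aloop, List.map_nil, targetLocation_nil, bloop_nil]
    | x :: rest =>
      -- abbreviations
      have hex : ∃ t ∈ x :: rest,
          ((fun t : Int × Int × Int => t.1 == lmax ((x :: rest).map (fun t => t.1))) t) = true := by
        rcases List.mem_map.mp (lmax_mem ((x :: rest).map (fun t : Int × Int × Int => t.1)) (by simp))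
          with ⟨t, ht, hte⟩
        exact ⟨t, ht, by simp [hte]⟩
      have hjlt : List.findIdx (fun t => t.1 == lmax ((x :: rest).map (fun t => t.1))) (x :: rest)
          < (x :: rest).length := List.findIdx_lt_length_of_exists hex
      set M := lmax ((x :: rest).map (fun t => t.1)) with hMdef
      set j := List.findIdx (fun t => t.1 == M) (x :: rest) with hjdef
      set e := (x :: rest)[j]'hjlt with hedef
      have heM : e.1 = M := by
        have := List.findIdx_getElem (p := fun t : Int × Int × Int => t.1 == M)
          (xs := x :: rest) (w := hjlt)
        simpa [← hjdef, ← hedef] using this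
      set tail := (x :: rest).drop (j+1) ++ (x :: rest).take j with htaildef
      have hq' : (x :: rest).drop j ++ (x :: rest).take j = e :: tail := by
        rw [List.drop_eq_getElem_cons hjlt, htaildef, List.cons_append]
      -- A: rotate to the first maximal element, print it, pull the printed entry out front
      have hrot := aloop_rot j (x :: rest) [] rank rfl hjlt
      have hpermq : (e :: tail).Perm (x :: rest) := by
        rw [← hq']
        have h1 := List.perm_append_comm (l₁ := (x :: rest).drop j) (l₂ := (x :: rest).take j)
        rwa [List.take_append_drop] at h1
      have hM' : lmax ((e :: tail).map (fun t => t.1)) = M :=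
        lmax_perm _ _ (hpermq.map _) (by simp)
      have hstep : aloop (e :: tail) [] rank
          = aloop tail ([(e.1, e.2.1, rank + 1)] ++ []) (rank + 1) := by
        rw [aloop, qmax_eq, if_neg (by rw [hM', heM]; exact lt_irrefl M), List.nil_append,
          List.append_nil]
      have hA : targetLocation (aloop (x :: rest) [] rank) location
          = if e.2.1 = location then some (rank + 1)
            else targetLocation (aloop tail [] (rank + 1)) location := by
        rw [hrot, hq', hstep, aloop_append, List.singleton_append, targetLocation_cons]
      -- B: one step of bloop on the converted list
      have hmap2 : ((x :: rest).map (fun t => (t.2.1, t.1))).map (fun t : Int × Int => t.2)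
          = (x :: rest).map (fun t => t.1) := by rw [List.map_map]; rfl
      have hmapcons : (x :: rest).map (fun t : Int × Int × Int => (t.2.1, t.1))
          = (x.2.1, x.1) :: rest.map (fun t => (t.2.1, t.1)) := List.map_cons ..
      have hm : (PySem.List.max? (((x.2.1, x.1) :: rest.map (fun t : Int × Int × Int => (t.2.1, t.1))).map
          (fun t : Int × Int => t.2)) (fun v => v)).getD 0 = M := by
        rw [← hmapcons, hmap2, hMdef]
        simp only [List.map_cons, PySem.List.max?_id_cons, Option.getD_some, lmax]
      have hj' : List.findIdx (fun t : Int × Int => t.2 == M)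
          ((x.2.1, x.1) :: rest.map (fun t : Int × Int × Int => (t.2.1, t.1))) = j := by
        rw [← hmapcons, List.findIdx_map]
        rfl
      have hjlt2 : j < ((x :: rest).map (fun t : Int × Int × Int => (t.2.1, t.1))).length := by
        rwa [List.length_map]
      have hi : (PySem.List.pyGetD ((x.2.1, x.1) :: rest.map (fun t : Int × Int × Int => (t.2.1, t.1)))
          ((j : Nat) : Int) ((0:Int),(0:Int))).1 = e.2.1 := by
        rw [← hmapcons, PySem.List.pyGetD_natCast,
          List.getD_eq_getElem _ _ hjlt2, List.getElem_map]
      have hslice : PySem.List.slice ((x.2.1, x.1) :: rest.map (fun t : Int × Int × Int => (t.2.1, t.1)))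
            (some (((j : Nat) : Int) + 1)) none
          ++ PySem.List.slice ((x.2.1, x.1) :: rest.map (fun t : Int × Int × Int => (t.2.1, t.1)))
            none (some ((j : Nat) : Int))
          = tail.map (fun t => (t.2.1, t.1)) := by
        rw [← hmapcons,
          show (((j : Nat) : Int) + 1) = (((j + 1 : Nat) : Nat) : Int) from by push_cast; ring,
          PySem.List.slice_from_natCast, PySem.List.slice_to_natCast,
          ← List.map_drop, ← List.map_take, ← List.map_append, htaildef]
      have htlen : tail.length < n := by
        have hj : j < rest.length + 1 := by simpa using hjlt
        have hn : rest.length + 1 = n := by simpa using hlen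
        rw [htaildef, List.length_append, List.length_drop, List.length_take, List.length_cons,
          Nat.min_eq_left (by omega)]
        omega
      have hB : bloop ((x :: rest).map (fun t => (t.2.1, t.1))) rank location
          = if e.2.1 = location then some (rank + 1)
            else bloop (tail.map (fun t => (t.2.1, t.1))) (rank + 1) location := by
        rw [hmapcons, bloop]
        simp only [hm, hj', hi, hslice]
      rw [hA, hB]
      by_cases hc : e.2.1 = location
      · rw [if_pos hc, if_pos hc]
      · rw [if_neg hc, if_neg hc]
        exact IH tail.length htlen tail (rank + 1) location rfl

-- ===== VERDICT (by name: the statement is the Claim_ definition above) =====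
theorem solution_spec : Claim_equal_solution := by
  intro priorities location _
  unfold Spec_solution solution solution_alt
  rw [PySem.List.foldl_append_singleton_eq_map (fun ip : Int × Int => (ip.2, ip.1, (0:Int)))]
  rw [List.nil_append, main_lemma _ _ _ _ rfl, List.map_map]
  have : ((fun t : Int × Int × Int => (t.2.1, t.1)) ∘ fun ip : Int × Int => (ip.2, ip.1, (0:Int))) = id := by
    funext ip; rfl
  rw [this, List.map_id]
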